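-- pv_equiv track=rewrite | github.com/sunbyte16/100-Day-Coding-Sprint | Day-23/Special Message.py | specialmsg
-- ===== SOURCE A (Python) =====
-- def specialmsg(s, vocab):
--     mp = {}
--     for key, value in vocab:
--         mp[key] = value
--
--     result = []
--     i = 0
--     n = len(s)
--
--     while i < n:
--         if s[i] == '(':
--             j = i + 1
--             key = ""
--             while j < n and s[j] != ')':
--                 key += s[j]
--                 j += 1
--
--             if key in mp:
--                 result.append(mp[key])
--             else:
--                 result.append("?")
--
--             i = j + 1
--         else:
--             result.append(s[i])
--             i += 1
--
--     return "".join(result)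
-- ===== SOURCE B (Python) =====
-- def specialmsg(s, vocab):
--     mp = dict(vocab)
--     out = []
--     rest = s
--     while True:
--         pre, sep, rest = rest.partition('(')
--         out.append(pre)
--         if not sep:
--             return ''.join(out)
--         key, _, rest = rest.partition(')')
--         out.append(mp.get(key, '?'))
-- ===== Notes on version B (the rewrite author's own statement) =====
-- stated objective: idiomatic
-- what changed: Replaces A's manual index bookkeeping (outer while over i with an inner char-by-char key-building loop) by an idiomatic loop over str.partition('(') / str.partition(')'), letting the library splitting do all scanning; dict(vocab) replaces the insert loop.
import Mathlib
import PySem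

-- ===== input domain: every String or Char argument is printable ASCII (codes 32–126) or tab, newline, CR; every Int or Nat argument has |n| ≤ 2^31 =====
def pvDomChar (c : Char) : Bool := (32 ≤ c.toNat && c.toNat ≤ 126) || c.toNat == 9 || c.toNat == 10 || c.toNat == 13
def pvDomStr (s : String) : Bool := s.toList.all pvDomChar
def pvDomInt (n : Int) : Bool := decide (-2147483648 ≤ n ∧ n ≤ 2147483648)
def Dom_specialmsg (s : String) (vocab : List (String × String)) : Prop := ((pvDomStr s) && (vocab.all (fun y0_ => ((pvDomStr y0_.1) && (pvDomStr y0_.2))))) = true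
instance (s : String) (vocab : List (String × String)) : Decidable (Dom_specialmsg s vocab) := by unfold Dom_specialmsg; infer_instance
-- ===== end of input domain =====

-- B rewrites A's manual index/inner-key scanning loop as an idiomatic str.partition loop
-- ('(' then ')'); same return value everywhere, no speed claim.

-- ===== PORT A =====
-- inner `while j < n and s[j] != ')'` loop: builds key, returns (key, j)
def pvKeyLoop (cs : List Char) (n j : Nat) (key : List Char) : List Char × Nat :=
  if hcond : j < n ∧ cs.getD j ' ' ≠ ')' then
    pvKeyLoop cs n (j + 1) (key ++ [cs.getD j ' '])
  else (key, j)
termination_by n - j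
decreasing_by omega

-- the resulting scan index never moves backwards (termination fact the outer loop cites)
theorem pvKeyLoop_ge (cs : List Char) (n j : Nat) (key : List Char) :
    j ≤ (pvKeyLoop cs n j key).2 := by
  fun_induction pvKeyLoop cs n j key with
  | case1 j key h ih => omega
  | case2 j key h => simp

-- outer `while i < n` loop, producing the `result` list of strings
def pvMainLoop (mp : PySem.Dict String String) (cs : List Char) (n i : Nat) : List String :=
  if hl : i < n then
    if cs.getD i ' ' = '(' then
      let kj := pvKeyLoop cs n (i + 1) []
      (match mp.get? (String.ofList kj.1) with
       | some v => v
       | none => "?") :: pvMainLoop mp cs n (kj.2 + 1)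
    else
      String.singleton (cs.getD i ' ') :: pvMainLoop mp cs n (i + 1)
  else []
termination_by n - i
decreasing_by
  · have := pvKeyLoop_ge cs n (i + 1) []
    omega
  · omega

def specialmsg (s : String) (vocab : List (String × String)) : String :=
  let mp : PySem.Dict String String :=
    vocab.foldl (fun d kv => d.insert kv.1 kv.2) PySem.Dict.empty
  PySem.Str.join "" (pvMainLoop mp s.toList s.toList.length 0)

-- ===== PORT B =====
-- Source B's `rest.partition(c)` for a single char c is hand-ported exactly as
-- (takeWhile (· ≠ c), dropWhile (· ≠ c)): the part before the first c, and the rest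
-- (empty ↔ separator absent; its head is the separator when present, its tail the after-part).
def pvAltLoop (mp : PySem.Dict String String) (l : List Char) : List String :=
  let pre := l.takeWhile (· ≠ '(')
  match hr : l.dropWhile (· ≠ '(') with
  | [] => [String.ofList pre]
  | _ :: r' =>
    let key := r'.takeWhile (· ≠ ')')
    String.ofList pre :: mp.getD (String.ofList key) "?" ::
      pvAltLoop mp (r'.dropWhile (· ≠ ')')).tail
termination_by l.length
decreasing_by
  have h1 : (l.dropWhile (· ≠ '(')).length ≤ l.length := List.length_dropWhile_le _ l
  have h2 : (r'.dropWhile (· ≠ ')')).length ≤ r'.length := List.length_dropWhile_le _ r'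
  have h3 : ((r'.dropWhile (· ≠ ')')).tail).length ≤ (r'.dropWhile (· ≠ ')')).length := by
    simp [List.length_tail]
  rw [hr] at h1
  simp at h1
  omega

def specialmsg_alt (s : String) (vocab : List (String × String)) : String :=
  let mp : PySem.Dict String String := PySem.Dict.ofList vocab
  PySem.Str.join "" (pvAltLoop mp s.toList)

-- ===== PRECONDITION & SPEC =====
def Spec_specialmsg (s : String) (vocab : List (String × String)) (out : String) : Prop := out = specialmsg_alt s vocab
instance (s : String) (vocab : List (String × String)) (out : String) : Decidable (Spec_specialmsg s vocab out) := by unfold Spec_specialmsg; infer_instance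

-- ===== CLAIM (what is proved, stated in full; the proofs are below) =====
def Claim_equal_specialmsg : Prop := ∀ (s : String) (vocab : List (String × String)), Dom_specialmsg s vocab → Spec_specialmsg s vocab (specialmsg s vocab)

-- ===== LEMMAS AND PROOFS =====

-- drop past the takeWhile block is the dropWhile block
theorem pv_drop_len_takeWhile (p : Char → Bool) (l : List Char) :
    l.drop (l.takeWhile p).length = l.dropWhile p := by
  induction l with
  | nil => rfl
  | cons a t ih => by_cases h : p a <;> simp [h, ih]

-- the inner key loop collects exactly the takeWhile-(≠')') block after index j
theorem pvKeyLoop_eq (cs : List Char) (j : Nat) (key : List Char) :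
    pvKeyLoop cs cs.length j key =
      (key ++ (cs.drop j).takeWhile (· ≠ ')'),
       j + ((cs.drop j).takeWhile (· ≠ ')')).length) := by
  fun_induction pvKeyLoop cs cs.length j key with
  | case1 j key h ih =>
    obtain ⟨hj, hne⟩ := h
    have hdrop : cs.drop j = cs.getD j ' ' :: cs.drop (j + 1) := by
      rw [List.getD_eq_getElem _ _ hj]
      exact List.drop_eq_getElem_cons hj
    have htw : (cs.getD j ' ' :: cs.drop (j + 1)).takeWhile (· ≠ ')') =
        cs.getD j ' ' :: (cs.drop (j + 1)).takeWhile (· ≠ ')') := by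
      rw [List.takeWhile_cons, if_pos (by simpa using hne)]
    rw [ih, hdrop, htw]
    simp [Prod.ext_iff]
    omega
  | case2 j key h =>
    rcases Nat.lt_or_ge j cs.length with hj | hj
    · have hc : cs.getD j ' ' = ')' := by
        by_contra hne; exact h ⟨hj, hne⟩
      have hdrop : cs.drop j = ')' :: cs.drop (j + 1) := by
        rw [← hc, List.getD_eq_getElem _ _ hj]
        exact List.drop_eq_getElem_cons hj
      simp [hdrop]
    · simp [List.drop_eq_nil_of_le hj]

-- flatten-join of a list of strings, at the char level
def pvJ (L : List String) : List Char := PySem.Chars.join [] (L.map String.toList)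

theorem pvJ_cons (x : String) (L : List String) : pvJ (x :: L) = x.toList ++ pvJ L := by
  cases L with
  | nil => simp [pvJ, PySem.Chars.join_singleton, PySem.Chars.join_nil]
  | cons y t => simp [pvJ, PySem.Chars.join_cons_cons]

-- B's loop on a '(' head: empty pre, one key block, recurse past the ')'
theorem pvAlt_cons_paren (mp : PySem.Dict String String) (l : List Char) :
    pvAltLoop mp ('(' :: l) = String.ofList [] ::
      mp.getD (String.ofList (l.takeWhile (· ≠ ')'))) "?" ::
      pvAltLoop mp ((l.dropWhile (· ≠ ')')).tail) := by
  have hd : (('(' : Char) :: l).dropWhile (· ≠ '(') = '(' :: l := by simp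
  rw [pvAltLoop]
  split
  · simp_all
  · rename_i heq
    rw [hd] at heq
    cases heq
    simp

-- B's loop on an ordinary head char: it joins to that char followed by the rest
theorem pvAlt_cons_ne (mp : PySem.Dict String String) (c : Char) (l : List Char) (hc : c ≠ '(') :
    pvJ (pvAltLoop mp (c :: l)) = c :: pvJ (pvAltLoop mp l) := by
  have hd : (c :: l).dropWhile (· ≠ '(') = l.dropWhile (· ≠ '(') := by simp [hc]
  rw [pvAltLoop, pvAltLoop]
  split <;> rename_i heq <;> rw [hd] at heq <;> split <;> rename_i heq2 <;>
    rw [heq] at heq2 <;> first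
      | (cases heq2; simp [pvJ, hc, PySem.Chars.join_cons_cons, PySem.Chars.join_singleton])
      | (exact absurd heq2 (by simp))

-- the two dicts agree: dict(vocab) is the insert-loop of A
theorem pv_dict_eq (vocab : List (String × String)) :
    PySem.Dict.ofList vocab =
      vocab.foldl (fun d kv => d.insert kv.1 kv.2) PySem.Dict.empty := rfl

-- core: from any index i, A's remaining output joins to B's output on the remaining chars
theorem pv_main_eq (mp : PySem.Dict String String) (cs : List Char) (i : Nat) :
    pvJ (pvMainLoop mp cs cs.length i) = pvJ (pvAltLoop mp (cs.drop i)) := by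
  generalize hfuel : cs.length - i = fuel
  induction fuel using Nat.strong_induction_on generalizing i with
  | _ fuel ih =>
  rcases Nat.lt_or_ge i cs.length with hi | hi
  · have hdrop : cs.drop i = cs.getD i ' ' :: cs.drop (i + 1) := by
      rw [List.getD_eq_getElem _ _ hi]
      exact List.drop_eq_getElem_cons hi
    by_cases hc : cs.getD i ' ' = '('
    · -- '(' branch
      rw [pvMainLoop, dif_pos hi, if_pos hc, pvKeyLoop_eq]
      simp only [List.nil_append]
      set key := (cs.drop (i + 1)).takeWhile (· ≠ ')') with hkey
      have hlt : cs.length - (i + 1 + key.length + 1) < fuel := by omega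
      rw [pvJ_cons, ih _ hlt _ rfl]
      rw [hc] at hdrop
      rw [hdrop, pvAlt_cons_paren, pvJ_cons, pvJ_cons]
      have hrest : cs.drop (i + 1 + key.length + 1) =
          ((cs.drop (i + 1)).dropWhile (· ≠ ')')).tail := by
        rw [List.drop_add_one_eq_tail_drop]
        congr 1
        rw [← pv_drop_len_takeWhile (· ≠ ')') (cs.drop (i + 1)), ← hkey, List.drop_drop]
      rw [hrest]
      have hmatch : ∀ o : Option String,
          (match o with | some v => v | none => "?") = o.getD "?" := by
        intro o; cases o <;> rfl
      simp only [hkey, ne_eq, decide_not]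
      rw [hmatch, ← PySem.Dict.getD_eq_get?_getD]
      simp
    · -- ordinary char
      rw [pvMainLoop, dif_pos hi, if_neg hc]
      have hlt : cs.length - (i + 1) < fuel := by omega
      rw [pvJ_cons, ih _ hlt _ rfl, hdrop, pvAlt_cons_ne mp _ _ hc]
      simp [String.singleton]
  · -- i ≥ n : both finished
    rw [List.drop_eq_nil_of_le hi, pvMainLoop, dif_neg (by omega)]
    rw [pvAltLoop]
    simp [pvJ, PySem.Chars.join_nil, PySem.Chars.join_singleton]

-- ===== VERDICT (by name: the statement is the Claim_ definition above) =====
theorem specialmsg_spec : Claim_equal_specialmsg := by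
  intro s vocab _
  unfold Spec_specialmsg specialmsg specialmsg_alt
  rw [pv_dict_eq]
  have h := pv_main_eq (vocab.foldl (fun d kv => d.insert kv.1 kv.2) PySem.Dict.empty) s.toList 0
  simp only [List.drop_zero] at h
  rw [PySem.Str.join, PySem.Str.join]
  exact congrArg String.ofList (by simpa [pvJ] using h)
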